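-- pv_equiv track=rewrite | github.com/echigot/MinecraftGenerator | SteamPoweredGenerator/partition.py | integrateMatrix
-- ===== SOURCE A (Python) =====
-- def integrateMatrix(bigMatrix, tinyMatrix, x,y,z, freeCoord):
--     for i in range (len(tinyMatrix)):
--         for j in range (len(tinyMatrix[0])):
--             for k in range(len(tinyMatrix[0][0])):
--                 if coordinatesInsideMatrix(bigMatrix, x+i, y+j, z+k):
--                     bigMatrix[x+i][y+j][z+k]=tinyMatrix[i][j][k]
--                     if (x+i,z+k) in freeCoord:
--                         freeCoord.remove((x+i,z+k))
--     return bigMatrix, freeCoord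
--
-- def coordinatesInsideMatrix(matrix, x,y,z):
--     width=len(matrix)
--     height=len(matrix[0])
--     length=len(matrix[0][0])
--
--     return (0<=x<width and 0<=y<height and 0<=z<length)
-- ===== SOURCE B (Python) =====
-- # Clipped-bounds rewrite: compute the legal index windows once and loop only over
-- # them, assigning unconditionally (no per-element bounds test). Like A, mutates
-- # bigMatrix and freeCoord in place; the proved equivalence is about the return value.
-- def integrateMatrix(bigMatrix, tinyMatrix, x, y, z, freeCoord):
--     if not tinyMatrix or not tinyMatrix[0] or not tinyMatrix[0][0]:
--         return bigMatrix, freeCoord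
--     ilo, ihi = max(0, -x), min(len(tinyMatrix), len(bigMatrix) - x)
--     jlo, jhi = max(0, -y), min(len(tinyMatrix[0]), len(bigMatrix[0]) - y)
--     klo, khi = max(0, -z), min(len(tinyMatrix[0][0]), len(bigMatrix[0][0]) - z)
--     for i in range(ilo, ihi):
--         for j in range(jlo, jhi):
--             for k in range(klo, khi):
--                 bigMatrix[x + i][y + j][z + k] = tinyMatrix[i][j][k]
--                 if (x + i, z + k) in freeCoord:
--                     freeCoord.remove((x + i, z + k))
--     return bigMatrix, freeCoord
-- ===== Notes on version B (the rewrite author's own statement) =====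
-- stated objective: faster
-- what changed: B computes the clipped iteration windows (max/min of the offsets against both matrices' dimensions) once up front and copies unconditionally over them, instead of A's full triple loop over tinyMatrix with a per-element bounds test; both mutate bigMatrix and freeCoord in place identically.
import Mathlib
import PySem

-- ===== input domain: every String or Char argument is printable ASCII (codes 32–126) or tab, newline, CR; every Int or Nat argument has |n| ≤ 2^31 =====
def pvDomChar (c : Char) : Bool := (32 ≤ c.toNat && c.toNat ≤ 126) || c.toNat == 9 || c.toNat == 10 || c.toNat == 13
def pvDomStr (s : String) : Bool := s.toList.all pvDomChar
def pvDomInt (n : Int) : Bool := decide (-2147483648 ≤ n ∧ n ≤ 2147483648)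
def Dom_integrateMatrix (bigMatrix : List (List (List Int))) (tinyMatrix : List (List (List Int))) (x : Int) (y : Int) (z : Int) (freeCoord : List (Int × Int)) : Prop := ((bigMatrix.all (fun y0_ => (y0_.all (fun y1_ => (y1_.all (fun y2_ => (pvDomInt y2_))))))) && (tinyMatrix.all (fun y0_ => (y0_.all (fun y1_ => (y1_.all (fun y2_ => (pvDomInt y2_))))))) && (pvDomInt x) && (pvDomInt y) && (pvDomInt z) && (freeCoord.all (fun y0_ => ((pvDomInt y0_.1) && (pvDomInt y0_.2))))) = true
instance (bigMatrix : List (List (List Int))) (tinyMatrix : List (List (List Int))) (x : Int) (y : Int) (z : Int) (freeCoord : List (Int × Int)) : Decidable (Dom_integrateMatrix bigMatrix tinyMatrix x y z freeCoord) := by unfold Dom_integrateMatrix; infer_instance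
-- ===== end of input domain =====

-- B replaces A's per-element bounds test by iteration bounds clipped once up front, iterating only
-- the overlap (measured faster in a timing run). Both Pythons mutate bigMatrix and freeCoord in
-- place in the same way; the equivalence proved here is about the return value.

-- ===== PORT A =====
-- len(matrix[0]) / len(matrix[0][0]) ported via headD []: exact except where Python raises
-- (matrix or matrix[0] empty), which Pre_ excludes.
def coordinatesInsideMatrix (matrix : List (List (List Int))) (x : Int) (y : Int) (z : Int) : Bool :=
  let width : Int := matrix.length
  let height : Int := (matrix.headD []).length
  let length : Int := ((matrix.headD []).headD []).length
  decide (0 ≤ x ∧ x < width) && decide (0 ≤ y ∧ y < height) && decide (0 ≤ z ∧ z < length)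

-- tiny[i][j][k] and the write into bigMatrix are ported with getD / modify / set: exact wherever
-- Python does not raise IndexError (raising inputs are excluded by Pre_); freeCoord.remove is
-- guarded by membership exactly as in A.
def integrateMatrix (bigMatrix : List (List (List Int))) (tinyMatrix : List (List (List Int))) (x : Int) (y : Int) (z : Int) (freeCoord : List (Int × Int)) : List (List (List Int)) × (List (Int × Int)) :=
  (List.range tinyMatrix.length).foldl (fun st (i : Nat) =>
    (List.range (tinyMatrix.headD []).length).foldl (fun st (j : Nat) =>
      (List.range ((tinyMatrix.headD []).headD []).length).foldl (fun st (k : Nat) =>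
        if coordinatesInsideMatrix st.1 (x + (i : Int)) (y + (j : Int)) (z + (k : Int)) then
          (st.1.modify (x + (i : Int)).toNat (fun r => r.modify (y + (j : Int)).toNat (fun c =>
              c.set (z + (k : Int)).toNat (((tinyMatrix.getD i []).getD j []).getD k 0))),
           if (x + (i : Int), z + (k : Int)) ∈ st.2 then
             (PySem.List.remove? st.2 (x + (i : Int), z + (k : Int))).getD st.2
           else st.2)
        else st) st) st) (bigMatrix, freeCoord)

-- ===== PORT B =====
def integrateMatrix_alt (bigMatrix : List (List (List Int))) (tinyMatrix : List (List (List Int))) (x : Int) (y : Int) (z : Int) (freeCoord : List (Int × Int)) : List (List (List Int)) × (List (Int × Int)) :=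
  if tinyMatrix = [] ∨ tinyMatrix.headD [] = [] ∨ (tinyMatrix.headD []).headD [] = [] then
    (bigMatrix, freeCoord)
  else
    let ilo : Int := max 0 (-x)
    let ihi : Int := min (tinyMatrix.length : Int) ((bigMatrix.length : Int) - x)
    let jlo : Int := max 0 (-y)
    let jhi : Int := min ((tinyMatrix.headD []).length : Int) (((bigMatrix.headD []).length : Int) - y)
    let klo : Int := max 0 (-z)
    let khi : Int := min (((tinyMatrix.headD []).headD []).length : Int) ((((bigMatrix.headD []).headD []).length : Int) - z)
    (PySem.List.pyRange ilo ihi 1).foldl (fun st i =>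
      (PySem.List.pyRange jlo jhi 1).foldl (fun st j =>
        (PySem.List.pyRange klo khi 1).foldl (fun st k =>
          (st.1.modify (x + i).toNat (fun r => r.modify (y + j).toNat (fun c =>
              c.set (z + k).toNat (((tinyMatrix.getD i.toNat []).getD j.toNat []).getD k.toNat 0))),
           if (x + i, z + k) ∈ st.2 then
             (PySem.List.remove? st.2 (x + i, z + k)).getD st.2
           else st.2)) st) st) (bigMatrix, freeCoord)

-- ===== PRECONDITION & SPEC =====
-- Pre_ admits exactly the inputs on which Python A returns (excludes exactly its IndexErrors):
-- when the tiny loops run at all, bigMatrix and bigMatrix[0] must be nonempty, and every (i,j,k)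
-- that passes A's bounds test must hit an existing row/cell of tinyMatrix and of bigMatrix
-- (ragged entries A never touches stay admitted).
def Pre_integrateMatrix (bigMatrix : List (List (List Int))) (tinyMatrix : List (List (List Int))) (x : Int) (y : Int) (z : Int) (freeCoord : List (Int × Int)) : Prop :=
  (tinyMatrix ≠ [] ∧ tinyMatrix.headD [] ≠ [] ∧ (tinyMatrix.headD []).headD [] ≠ []) →
    (bigMatrix ≠ [] ∧ bigMatrix.headD [] ≠ [] ∧
      ∀ i ∈ List.range tinyMatrix.length, ∀ j ∈ List.range (tinyMatrix.headD []).length,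
        ∀ k ∈ List.range ((tinyMatrix.headD []).headD []).length,
          (0 ≤ x + (i : Int) ∧ x + (i : Int) < (bigMatrix.length : Int) ∧
           0 ≤ y + (j : Int) ∧ y + (j : Int) < ((bigMatrix.headD []).length : Int) ∧
           0 ≤ z + (k : Int) ∧ z + (k : Int) < (((bigMatrix.headD []).headD []).length : Int)) →
          (j < (tinyMatrix.getD i []).length ∧ k < ((tinyMatrix.getD i []).getD j []).length ∧
           y + (j : Int) < ((bigMatrix.getD (x + (i : Int)).toNat []).length : Int) ∧
           z + (k : Int) < (((bigMatrix.getD (x + (i : Int)).toNat []).getD (y + (j : Int)).toNat []).length : Int)))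
instance (bigMatrix : List (List (List Int))) (tinyMatrix : List (List (List Int))) (x : Int) (y : Int) (z : Int) (freeCoord : List (Int × Int)) : Decidable (Pre_integrateMatrix bigMatrix tinyMatrix x y z freeCoord) := by unfold Pre_integrateMatrix; infer_instance
def pvWitness_integrateMatrix : List (List (List Int)) × List (List (List Int)) × Int × Int × Int × (List (Int × Int)) := ([[[0]]], [[[1]]], 0, 0, 0, [(0, 0)])

def Spec_integrateMatrix (bigMatrix : List (List (List Int))) (tinyMatrix : List (List (List Int))) (x : Int) (y : Int) (z : Int) (freeCoord : List (Int × Int)) (out : List (List (List Int)) × (List (Int × Int))) : Prop := out = integrateMatrix_alt bigMatrix tinyMatrix x y z freeCoord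
instance (bigMatrix : List (List (List Int))) (tinyMatrix : List (List (List Int))) (x : Int) (y : Int) (z : Int) (freeCoord : List (Int × Int)) (out : List (List (List Int)) × (List (Int × Int))) : Decidable (Spec_integrateMatrix bigMatrix tinyMatrix x y z freeCoord out) := by unfold Spec_integrateMatrix; infer_instance

-- ===== CLAIM (what is proved, stated in full; the proofs are below) =====
def Claim_equal_integrateMatrix : Prop := ∀ (bigMatrix : List (List (List Int))) (tinyMatrix : List (List (List Int))) (x : Int) (y : Int) (z : Int) (freeCoord : List (Int × Int)), Dom_integrateMatrix bigMatrix tinyMatrix x y z freeCoord → Pre_integrateMatrix bigMatrix tinyMatrix x y z freeCoord → Spec_integrateMatrix bigMatrix tinyMatrix x y z freeCoord (integrateMatrix bigMatrix tinyMatrix x y z freeCoord)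

-- ===== LEMMAS AND PROOFS =====

-- The loop body shared by both ports, with all three indices as integers.
def pvStep (tinyMatrix : List (List (List Int))) (x y z : Int) (st : List (List (List Int)) × (List (Int × Int))) (i j k : Int) : List (List (List Int)) × (List (Int × Int)) :=
  (st.1.modify (x + i).toNat (fun r => r.modify (y + j).toNat (fun c =>
      c.set (z + k).toNat (((tinyMatrix.getD i.toNat []).getD j.toNat []).getD k.toNat 0))),
   if (x + i, z + k) ∈ st.2 then (PySem.List.remove? st.2 (x + i, z + k)).getD st.2 else st.2)

-- The three lengths A's bounds test reads.
def pvDims (b : List (List (List Int))) : Nat × Nat × Nat :=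
  (b.length, (b.headD []).length, ((b.headD []).headD []).length)

theorem pvHead2 (l : List (List Int)) (b c : Nat) (v : Int) :
    ((l.modify b (fun w => w.set c v)).head?.getD []).length = (l.head?.getD []).length := by
  cases l with
  | nil => simp
  | cons h t => cases b with
    | zero => simp
    | succ b => simp

theorem pvDims_upd (l : List (List (List Int))) (a b c : Nat) (v : Int) :
    pvDims (l.modify a (fun r => r.modify b (fun w => w.set c v))) = pvDims l := by
  cases l with
  | nil => simp [pvDims]
  | cons h t => cases a with
    | zero => simp [pvDims, List.length_modify, pvHead2]
    | succ a => simp [pvDims]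

theorem pvCim_congr (b b' : List (List (List Int))) (h : pvDims b = pvDims b') (X Y Z : Int) :
    coordinatesInsideMatrix b X Y Z = coordinatesInsideMatrix b' X Y Z := by
  unfold coordinatesInsideMatrix
  have h1 : b.length = b'.length := congrArg Prod.fst h
  have h2 : (b.headD []).length = (b'.headD []).length := congrArg (fun p => p.2.1) h
  have h3 : ((b.headD []).headD []).length = ((b'.headD []).headD []).length := congrArg (fun p => p.2.2) h
  simp only [h1, h2, h3]

theorem pvFoldl_ext {σ α : Type} (f g : σ → α → σ) (l : List α) (s : σ)
    (h : ∀ s a, f s a = g s a) : l.foldl f s = l.foldl g s := by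
  induction l generalizing s with
  | nil => rfl
  | cons a t ih => simp only [List.foldl_cons, h, ih]

theorem pvFoldl_pres {σ α : Type} (P : σ → Prop) (f : σ → α → σ) (l : List α) (s : σ)
    (hs : P s) (hf : ∀ s a, P s → P (f s a)) : P (l.foldl f s) := by
  induction l generalizing s with
  | nil => exact hs
  | cons a t ih => exact ih _ (hf _ _ hs)

theorem pvFoldl_inv_congr {σ α : Type} (P : σ → Prop) (f g : σ → α → σ) (l : List α) (s : σ)
    (hs : P s) (hf : ∀ s a, P s → P (f s a)) (he : ∀ s a, P s → f s a = g s a) :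
    l.foldl f s = l.foldl g s := by
  induction l generalizing s with
  | nil => rfl
  | cons a t ih => simp only [List.foldl_cons, he _ _ hs]; rw [← he _ _ hs]; exact ih _ (hf _ _ hs)

-- Clipping lemma: a guarded fold over range(n) is the unguarded fold over the clipped window.
theorem pvClip {σ : Type} (h : σ → Int → σ) (lo hi : Int) (n : Nat) (s : σ) :
    (List.range n).foldl (fun s (i : Nat) => if lo ≤ (i : Int) ∧ (i : Int) < hi then h s (i : Int) else s) s
      = (PySem.List.pyRange (max 0 lo) (min hi (n : Int)) 1).foldl h s := by
  induction n with
  | zero =>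
    simp
  | succ n ih =>
    rw [List.range_succ, List.foldl_append]
    simp only [List.foldl_cons, List.foldl_nil]
    by_cases hg : lo ≤ (n : Int) ∧ (n : Int) < hi
    · rw [if_pos hg, ih]
      have h1 : min hi ((n : Nat) : Int) = (n : Int) := by omega
      have h2 : min hi (((n + 1 : Nat)) : Int) = (n : Int) + 1 := by push_cast; omega
      rw [h1, h2, PySem.List.pyRange_one_succ_right (by omega : max 0 lo ≤ (n : Int)),
        List.foldl_append]
      simp
    · rw [if_neg hg, ih]
      by_cases hhi : hi ≤ (n : Int)
      · have : min hi (((n + 1 : Nat)) : Int) = min hi ((n : Nat) : Int) := by push_cast; omega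
        rw [this]
      · have hlo : (n : Int) < lo := by omega
        rw [PySem.List.pyRange_one_eq_nil (by push_cast; omega),
            PySem.List.pyRange_one_eq_nil (by push_cast; omega)]

theorem pvCim_true_iff (b : List (List (List Int))) (X Y Z : Int) :
    coordinatesInsideMatrix b X Y Z = true ↔
      (0 ≤ X ∧ X < (b.length : Int)) ∧ (0 ≤ Y ∧ Y < ((b.headD []).length : Int)) ∧
        (0 ≤ Z ∧ Z < (((b.headD []).headD []).length : Int)) := by
  simp [coordinatesInsideMatrix, and_assoc]

-- A's fold with the bounds test factored into one pure guard per loop level.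
def pvCanon (bigMatrix tinyMatrix : List (List (List Int))) (x y z : Int) (freeCoord : List (Int × Int)) : List (List (List Int)) × (List (Int × Int)) :=
  (List.range tinyMatrix.length).foldl (fun st (i : Nat) =>
    if -x ≤ (i : Int) ∧ (i : Int) < (bigMatrix.length : Int) - x then
      (List.range (tinyMatrix.headD []).length).foldl (fun st (j : Nat) =>
        if -y ≤ (j : Int) ∧ (j : Int) < ((bigMatrix.headD []).length : Int) - y then
          (List.range ((tinyMatrix.headD []).headD []).length).foldl (fun st (k : Nat) =>
            if -z ≤ (k : Int) ∧ (k : Int) < (((bigMatrix.headD []).headD []).length : Int) - z then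
              pvStep tinyMatrix x y z st (i : Int) (j : Int) (k : Int) else st) st
        else st) st
    else st) (bigMatrix, freeCoord)

theorem pvA_eq_canon (bigMatrix tinyMatrix : List (List (List Int))) (x y z : Int) (freeCoord : List (Int × Int)) :
    integrateMatrix bigMatrix tinyMatrix x y z freeCoord = pvCanon bigMatrix tinyMatrix x y z freeCoord := by
  unfold integrateMatrix pvCanon
  refine pvFoldl_inv_congr (fun st => pvDims st.1 = pvDims bigMatrix) _ _ _ _ rfl ?_ ?_
  · intro st i hP
    refine pvFoldl_pres (fun st : List (List (List Int)) × List (Int × Int) => pvDims st.1 = pvDims bigMatrix) _ _ _ hP ?_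
    intro st j hP
    refine pvFoldl_pres (fun st : List (List (List Int)) × List (Int × Int) => pvDims st.1 = pvDims bigMatrix) _ _ _ hP ?_
    intro st k hP
    dsimp only
    split
    · exact (pvDims_upd _ _ _ _ _).trans hP
    · exact hP
  · intro st i hP
    by_cases hQi : -x ≤ (i : Int) ∧ (i : Int) < (bigMatrix.length : Int) - x
    · rw [if_pos hQi]
      refine pvFoldl_inv_congr (fun st => pvDims st.1 = pvDims bigMatrix) _ _ _ _ hP ?_ ?_
      · intro st j hP
        refine pvFoldl_pres (fun st : List (List (List Int)) × List (Int × Int) => pvDims st.1 = pvDims bigMatrix) _ _ _ hP ?_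
        intro st k hP
        dsimp only
        split
        · exact (pvDims_upd _ _ _ _ _).trans hP
        · exact hP
      · intro st j hP
        by_cases hQj : -y ≤ (j : Int) ∧ (j : Int) < ((bigMatrix.headD []).length : Int) - y
        · rw [if_pos hQj]
          refine pvFoldl_inv_congr (fun st => pvDims st.1 = pvDims bigMatrix) _ _ _ _ hP ?_ ?_
          · intro st k hP
            dsimp only
            split
            · exact (pvDims_upd _ _ _ _ _).trans hP
            · exact hP
          · intro st k hP
            dsimp only
            by_cases hQk : -z ≤ (k : Int) ∧ (k : Int) < (((bigMatrix.headD []).headD []).length : Int) - z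
            · rw [if_pos hQk, pvCim_congr st.1 bigMatrix hP,
                if_pos ((pvCim_true_iff bigMatrix _ _ _).mpr
                  ⟨⟨by omega, by omega⟩, ⟨by omega, by omega⟩, by omega, by omega⟩)]
              simp [pvStep]
            · rw [if_neg hQk, pvCim_congr st.1 bigMatrix hP,
                if_neg (by rw [pvCim_true_iff]; omega)]
        · rw [if_neg hQj]
          refine (pvFoldl_inv_congr (fun st => pvDims st.1 = pvDims bigMatrix) _ (fun s _ => s) _ _ hP ?_ ?_).trans (List.foldl_fixed _)
          · intro st k hP
            dsimp only
            split
            · exact (pvDims_upd _ _ _ _ _).trans hP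
            · exact hP
          · intro st k hP
            dsimp only
            rw [pvCim_congr st.1 bigMatrix hP, if_neg (by rw [pvCim_true_iff]; omega)]
    · rw [if_neg hQi]
      refine (pvFoldl_inv_congr (fun st => pvDims st.1 = pvDims bigMatrix) _ (fun s _ => s) _ _ hP ?_ ?_).trans (List.foldl_fixed _)
      · intro st j hP
        refine pvFoldl_pres (fun st : List (List (List Int)) × List (Int × Int) => pvDims st.1 = pvDims bigMatrix) _ _ _ hP ?_
        intro st k hP
        dsimp only
        split
        · exact (pvDims_upd _ _ _ _ _).trans hP
        · exact hP
      · intro st j hP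
        refine (pvFoldl_inv_congr (fun st => pvDims st.1 = pvDims bigMatrix) _ (fun s _ => s) _ _ hP ?_ ?_).trans (List.foldl_fixed _)
        · intro st k hP
          dsimp only
          split
          · exact (pvDims_upd _ _ _ _ _).trans hP
          · exact hP
        · intro st k hP
          dsimp only
          rw [pvCim_congr st.1 bigMatrix hP, if_neg (by rw [pvCim_true_iff]; omega)]

theorem pvClip3 {s : Type} (g : s → Int → Int → Int → s)
    (lox hix loy hiy loz hiz : Int) (n1 n2 n3 : Nat) (s0 : s) :
    (List.range n1).foldl (fun st (i : Nat) =>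
      if lox ≤ (i : Int) ∧ (i : Int) < hix then
        (List.range n2).foldl (fun st (j : Nat) =>
          if loy ≤ (j : Int) ∧ (j : Int) < hiy then
            (List.range n3).foldl (fun st (k : Nat) =>
              if loz ≤ (k : Int) ∧ (k : Int) < hiz then g st (i : Int) (j : Int) (k : Int) else st) st
          else st) st
      else st) s0
    = (PySem.List.pyRange (max 0 lox) (min hix (n1 : Int)) 1).foldl (fun st i =>
        (PySem.List.pyRange (max 0 loy) (min hiy (n2 : Int)) 1).foldl (fun st j =>
          (PySem.List.pyRange (max 0 loz) (min hiz (n3 : Int)) 1).foldl (fun st k =>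
            g st i j k) st) st) s0 := by
  refine (pvClip (fun st ii =>
      (List.range n2).foldl (fun st (j : Nat) =>
        if loy ≤ (j : Int) ∧ (j : Int) < hiy then
          (List.range n3).foldl (fun st (k : Nat) =>
            if loz ≤ (k : Int) ∧ (k : Int) < hiz then g st ii (j : Int) (k : Int) else st) st
        else st) st) lox hix n1 s0).trans ?_
  refine pvFoldl_ext _ _ _ _ ?_
  intro st i
  refine (pvClip (fun st jj =>
      (List.range n3).foldl (fun st (k : Nat) =>
        if loz ≤ (k : Int) ∧ (k : Int) < hiz then g st i jj (k : Int) else st) st) loy hiy n2 st).trans ?_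
  refine pvFoldl_ext _ _ _ _ ?_
  intro st j
  exact pvClip (fun st kk => g st i j kk) loz hiz n3 st

theorem pvCanon_eq_alt (bigMatrix tinyMatrix : List (List (List Int))) (x y z : Int) (freeCoord : List (Int × Int)) :
    pvCanon bigMatrix tinyMatrix x y z freeCoord = integrateMatrix_alt bigMatrix tinyMatrix x y z freeCoord := by
  by_cases hemp : tinyMatrix = [] ∨ tinyMatrix.headD [] = [] ∨ (tinyMatrix.headD []).headD [] = []
  · rw [integrateMatrix_alt, if_pos hemp]
    rcases hemp with h | h | h
    · rw [pvCanon, h]; rfl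
    · rw [pvCanon, h]; simp
    · rw [pvCanon, h]; simp
  · rw [integrateMatrix_alt, if_neg hemp]
    refine (pvClip3 (pvStep tinyMatrix x y z) (-x) ((bigMatrix.length : Int) - x)
      (-y) (((bigMatrix.headD []).length : Int) - y)
      (-z) ((((bigMatrix.headD []).headD []).length : Int) - z)
      tinyMatrix.length (tinyMatrix.headD []).length ((tinyMatrix.headD []).headD []).length
      (bigMatrix, freeCoord)).trans ?_
    rw [min_comm ((bigMatrix.length : Int) - x) _, min_comm (((bigMatrix.headD []).length : Int) - y) _,
      min_comm ((((bigMatrix.headD []).headD []).length : Int) - z) _]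
    simp only [pvStep]

theorem integrateMatrix_spec : Claim_equal_integrateMatrix := by
  intro bigMatrix tinyMatrix x y z freeCoord _dom _pre
  unfold Spec_integrateMatrix
  rw [pvA_eq_canon, pvCanon_eq_alt]
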